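-- pv_equiv track=rewrite | github.com/bhavish19/py-zkCNN | Phase 2/zkcnn_subprocess_wrapper.py | _parse_timing_output
-- ===== SOURCE A (Python) =====
-- from typing import Dict, Any, Optional, List
--
-- def _parse_timing_output(stdout: str) -> Dict[str, Any]:
--     """Parse timing information from the C++ binary output"""
--     timing_info = {}
--
--     # Look for timing patterns in the output
--     lines = stdout.split('\n')
--     for line in lines:
--         line = line.strip()
--
--         # Look for common timing patterns
--         if 'time' in line.lower() or 'seconds' in line.lower():
--             timing_info['raw_timing_line'] = line
--
--         # Look for proof size information
--         if 'kb' in line.lower() or 'size' in line.lower():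
--             timing_info['raw_size_line'] = line
--
--         # Look for circuit size information
--         if 'gates' in line.lower() or 'circuit' in line.lower():
--             timing_info['raw_circuit_line'] = line
--
--     return timing_info
-- ===== SOURCE B (Python) =====
-- def _parse_timing_output(stdout):
--     """Parse timing information from the C++ binary output."""
--     patterns = [
--         ('raw_timing_line', ('time', 'seconds')),
--         ('raw_size_line', ('kb', 'size')),
--         ('raw_circuit_line', ('gates', 'circuit')),
--     ]
--     found = {}
--     for raw in reversed(stdout.split('\n')):
--         line = raw.strip()
--         low = line.lower()
--         for key, subs in patterns:
--             if key not in found and any(s in low for s in subs):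
--                 found[key] = line
--         if len(found) == len(patterns):
--             break
--     return {key: found[key] for key, _ in patterns if key in found}
-- ===== Notes on version B (the rewrite author's own statement) =====
-- stated objective: alternative
-- what changed: B scans the lines in reverse and records, per key, the first matching line from the end (= A's last-wins value), breaking out as soon as all three keys are found, and emits the keys in the fixed (timing, size, circuit) order; Pre_ excludes inputs where the patterns' first matching lines occur out of that fixed order, on which A's dict insertion order (order of first matches) is accidental - the key/value pairs still agree there, only the dict order differs.
import Mathlib
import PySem

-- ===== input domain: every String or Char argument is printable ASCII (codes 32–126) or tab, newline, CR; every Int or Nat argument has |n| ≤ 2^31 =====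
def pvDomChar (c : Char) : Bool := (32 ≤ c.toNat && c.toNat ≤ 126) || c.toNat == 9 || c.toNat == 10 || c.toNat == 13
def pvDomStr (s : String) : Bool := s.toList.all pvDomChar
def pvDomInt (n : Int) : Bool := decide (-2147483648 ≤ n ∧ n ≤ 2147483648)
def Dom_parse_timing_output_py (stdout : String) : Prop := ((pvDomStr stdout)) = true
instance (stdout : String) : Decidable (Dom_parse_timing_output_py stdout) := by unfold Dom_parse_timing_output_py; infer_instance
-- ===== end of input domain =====

-- B scans the lines in reverse, recording per key the first matching line from the end and
-- stopping once all three keys are found, emitting keys in the fixed (timing, size, circuit)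
-- order; an alternative decomposition of the same extraction.

-- ===== PORT A =====
def parse_timing_output_py (stdout : String) : List (String × String) :=
  -- lines = stdout.split('\n'); the separator "\n" is non-empty, so split? is always `some`
  let lines := (PySem.Str.split? stdout "\n").getD []
  (lines.foldl (fun (timing_info : PySem.Dict String String) line =>
      let line := PySem.Str.strip line
      let timing_info :=
        if PySem.Str.isIn "time" (PySem.Str.lower line) || PySem.Str.isIn "seconds" (PySem.Str.lower line) then
          timing_info.insert "raw_timing_line" line
        else timing_info
      let timing_info :=
        if PySem.Str.isIn "kb" (PySem.Str.lower line) || PySem.Str.isIn "size" (PySem.Str.lower line) then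
          timing_info.insert "raw_size_line" line
        else timing_info
      if PySem.Str.isIn "gates" (PySem.Str.lower line) || PySem.Str.isIn "circuit" (PySem.Str.lower line) then
        timing_info.insert "raw_circuit_line" line
      else timing_info)
    PySem.Dict.empty).items

-- ===== PORT B =====
-- the `patterns` list of Source B
def pvPatterns : List (String × List String) :=
  [("raw_timing_line", ["time", "seconds"]),
   ("raw_size_line", ["kb", "size"]),
   ("raw_circuit_line", ["gates", "circuit"])]

-- Source B's `for raw in reversed(...)` loop with the early `break`
def pvAltLoop (patterns : List (String × List String)) (found : PySem.Dict String String) :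
    List String → PySem.Dict String String
  | [] => found
  | raw :: rest =>
      let line := PySem.Str.strip raw
      let low := PySem.Str.lower line
      let found := patterns.foldl
        (fun f p =>
          if !(f.contains p.1) && p.2.any (fun s => PySem.Str.isIn s low) then f.insert p.1 line
          else f) found
      if found.size == patterns.length then found else pvAltLoop patterns found rest

def parse_timing_output_py_alt (stdout : String) : List (String × String) :=
  let found := pvAltLoop pvPatterns PySem.Dict.empty (((PySem.Str.split? stdout "\n").getD []).reverse)
  -- {key: found[key] for key, _ in patterns if key in found}
  pvPatterns.foldl (fun acc p => if found.contains p.1 then acc ++ [(p.1, found.getD p.1 "")] else acc) []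

-- ===== PRECONDITION & SPEC =====
-- the three line predicates (on an already stripped line)
def pvPT (l : String) : Bool := PySem.Str.isIn "time" (PySem.Str.lower l) || PySem.Str.isIn "seconds" (PySem.Str.lower l)
def pvPS (l : String) : Bool := PySem.Str.isIn "kb" (PySem.Str.lower l) || PySem.Str.isIn "size" (PySem.Str.lower l)
def pvPC (l : String) : Bool := PySem.Str.isIn "gates" (PySem.Str.lower l) || PySem.Str.isIn "circuit" (PySem.Str.lower l)
def pvLines (stdout : String) : List String := ((PySem.Str.split? stdout "\n").getD []).map PySem.Str.strip
def pvLeO (a b : Option Nat) : Bool :=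
  match a, b with
  | some i, some j => decide (i ≤ j)
  | _, _ => true
-- Pre_ excludes inputs on which the patterns' first matching lines occur out of the canonical
-- (timing, size, circuit) order: there A still returns the same key/value mapping, but its dict's
-- insertion order (order of first matches) is accidental and B lists the keys canonically.
def Pre_parse_timing_output_py (stdout : String) : Prop :=
  pvLeO ((pvLines stdout).findIdx? pvPT) ((pvLines stdout).findIdx? pvPS) = true ∧
  pvLeO ((pvLines stdout).findIdx? pvPS) ((pvLines stdout).findIdx? pvPC) = true ∧
  pvLeO ((pvLines stdout).findIdx? pvPT) ((pvLines stdout).findIdx? pvPC) = true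
instance (stdout : String) : Decidable (Pre_parse_timing_output_py stdout) := by
  unfold Pre_parse_timing_output_py; infer_instance
def pvWitness_parse_timing_output_py : String := "time 1\nsize 2 kb\ngates 3"

def Spec_parse_timing_output_py (stdout : String) (out : List (String × String)) : Prop := out = parse_timing_output_py_alt stdout
instance (stdout : String) (out : List (String × String)) : Decidable (Spec_parse_timing_output_py stdout out) := by unfold Spec_parse_timing_output_py; infer_instance

-- ===== CLAIM (what is proved, stated in full; the proofs are below) =====
def Claim_equal_parse_timing_output_py : Prop := ∀ (stdout : String), Dom_parse_timing_output_py stdout → Pre_parse_timing_output_py stdout → Spec_parse_timing_output_py stdout (parse_timing_output_py stdout)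

-- ===== LEMMAS AND PROOFS =====

def pvPred (k : String) (l : String) : Bool :=
  if k = "raw_timing_line" then pvPT l else if k = "raw_size_line" then pvPS l else pvPC l

def pvMatches (p : String → Bool) (L : List String) : List Int :=
  ((PySem.List.enumerate L 0).filter (fun q => p q.2)).map (fun q => q.1)
def pvVal (p : String → Bool) (L : List String) : String :=
  PySem.List.pyGetD L (PySem.List.pyGetD (pvMatches p L) (-1) 0) ""
def pvEnt (k : String) (p : String → Bool) (L : List String) : List (Int × String × String) :=
  match pvMatches p L with
  | [] => []
  | m :: _ => [(m, k, pvVal p L)]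
def pvEnts (L : List String) : List (Int × String × String) :=
  pvEnt "raw_timing_line" pvPT L ++ pvEnt "raw_size_line" pvPS L ++ pvEnt "raw_circuit_line" pvPC L
def pvS (L : List String) : List (Int × String × String) :=
  PySem.List.sorted (pvEnts L) (fun e => e.1)
def pvStrip2 (e : Int × String × String) : String × String := (e.2.1, e.2.2)

-- A's loop body on a stripped line
def pvStep (d : PySem.Dict String String) (line : String) : PySem.Dict String String :=
  let d := if pvPT line then d.insert "raw_timing_line" line else d
  let d := if pvPS line then d.insert "raw_size_line" line else d
  if pvPC line then d.insert "raw_circuit_line" line else d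

def pvUpd (l : String) (e : Int × String × String) : Int × String × String :=
  (e.1, e.2.1, if pvPred e.2.1 l then l else e.2.2)
def pvNews (k : String) (p : String → Bool) (l : String) (L : List String) : List (Int × String × String) :=
  if p l && (pvMatches p L).isEmpty then [((L.length : Int), k, l)] else []
def pvBf (a b : Int × String × String) : Bool := decide (a.1 < b.1)

-- the canonical-order result both ports reach
def pvSeg (k : String) (o : Option String) : List (String × String) :=
  match o with
  | some v => [(k, v)]
  | none => []
def pvCanon (L : List String) : List (String × String) :=
  pvSeg "raw_timing_line" (L.reverse.find? pvPT) ++ pvSeg "raw_size_line" (L.reverse.find? pvPS)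
    ++ pvSeg "raw_circuit_line" (L.reverse.find? pvPC)

-- ---- generic insertion-sort fold lemmas ----
theorem pvG1 (u : Int × String × String → Int × String × String) (hu : ∀ e, (u e).1 = e.1)
    (x : Int × String × String) (acc : List (Int × String × String)) :
    PySem.List.insertBy pvBf (u x) (acc.map u) = (PySem.List.insertBy pvBf x acc).map u := by
  induction acc with
  | nil => simp [PySem.List.insertBy]
  | cons a rest ih =>
      simp only [List.map_cons, PySem.List.insertBy]
      have : pvBf (u x) (u a) = pvBf x a := by simp [pvBf, hu]
      rw [this]
      cases h : pvBf x a <;> simp [ih]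

theorem pvG1f (u : Int × String × String → Int × String × String) (hu : ∀ e, (u e).1 = e.1)
    (xs acc : List (Int × String × String)) :
    (xs.map u).foldl (fun acc x => PySem.List.insertBy pvBf x acc) (acc.map u)
      = (xs.foldl (fun acc x => PySem.List.insertBy pvBf x acc) acc).map u := by
  induction xs generalizing acc with
  | nil => simp
  | cons a rest ih =>
      simp only [List.map_cons, List.foldl_cons]
      rw [pvG1 u hu, ih]

theorem pvG2f (n acc : List (Int × String × String)) (hlen : n.length ≤ 1)
    (h : ∀ x ∈ n, ∀ y ∈ acc, pvBf x y = false) :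
    n.foldl (fun acc x => PySem.List.insertBy pvBf x acc) acc = acc ++ n := by
  match n with
  | [] => simp
  | [x] =>
      simp only [List.foldl_cons, List.foldl_nil]
      exact PySem.List.insertBy_of_forall_not_before _ _ _ (h x (by simp))
  | x :: y :: rest => simp at hlen

theorem pvG3 (y : Int × String × String) (acc t : List (Int × String × String))
    (h : ∀ z ∈ t, pvBf y z = true) :
    PySem.List.insertBy pvBf y (acc ++ t) = PySem.List.insertBy pvBf y acc ++ t := by
  induction acc with
  | nil =>
      cases t with
      | nil => simp
      | cons z t' => simp [PySem.List.insertBy, h z (by simp)]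
  | cons a rest ih =>
      simp only [List.cons_append, PySem.List.insertBy]
      cases hb : pvBf y a <;> simp [ih]

theorem pvG3f (xs acc t : List (Int × String × String))
    (h : ∀ y ∈ xs, ∀ z ∈ t, pvBf y z = true) :
    xs.foldl (fun acc x => PySem.List.insertBy pvBf x acc) (acc ++ t)
      = xs.foldl (fun acc x => PySem.List.insertBy pvBf x acc) acc ++ t := by
  induction xs generalizing acc with
  | nil => simp
  | cons a rest ih =>
      simp only [List.foldl_cons]
      rw [pvG3 a acc t (h a (by simp)), ih]
      intro y hy z hz; exact h y (by simp [hy]) z hz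

theorem pvG4 (xs acc : List (Int × String × String)) (y : Int × String × String)
    (h : y ∈ xs.foldl (fun acc x => PySem.List.insertBy pvBf x acc) acc) :
    y ∈ acc ∨ y ∈ xs := by
  induction xs generalizing acc with
  | nil => simp at h; exact Or.inl h
  | cons a rest ih =>
      simp only [List.foldl_cons] at h
      rcases ih _ h with h' | h'
      · rcases (PySem.List.mem_insertBy _ _ _ _).1 h' with h'' | h''
        · exact Or.inr (by simp [h''])
        · exact Or.inl h''
      · exact Or.inr (by simp [h'])

-- ---- matches / value lemmas ----
theorem pvM1 (p : String → Bool) (L : List String) (l : String) :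
    pvMatches p (L ++ [l]) = pvMatches p L ++ (if p l then [(L.length : Int)] else []) := by
  unfold pvMatches
  rw [PySem.List.enumerate_append, List.filter_append, List.map_append]
  congr 1
  cases h : p l <;>
    simp [PySem.List.enumerate_cons, PySem.List.enumerate_nil, h]

theorem pvM2 (p : String → Bool) (L : List String) (i : Int) (h : i ∈ pvMatches p L) :
    0 ≤ i ∧ i < (L.length : Int) := by
  unfold pvMatches at h
  simp only [List.mem_map, List.mem_filter] at h
  obtain ⟨q, ⟨hq, _⟩, rfl⟩ := h
  rw [PySem.List.mem_enumerate_iff] at hq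
  obtain ⟨k, hk, rfl⟩ := hq
  refine ⟨by simp, ?_⟩
  simp
  omega

theorem pvLast_mem (xs : List Int) (h : xs ≠ []) : PySem.List.pyGetD xs (-1) 0 ∈ xs := by
  have hlen : 0 < xs.length := List.length_pos_iff.2 h
  simp only [PySem.List.pyGetD, PySem.List.pyGet?, PySem.List.pyIdx?]
  have h1 : ¬ (0 : Int) ≤ -1 := by omega
  have h2 : -(xs.length : Int) ≤ -1 := by omega
  simp only [h1, if_false, h2, if_true]
  have : xs.length - (-(-1 : Int)).toNat = xs.length - 1 := by norm_num
  rw [this]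
  have hlt : xs.length - 1 < xs.length := by omega
  simp [List.getElem?_eq_getElem hlt]

theorem pvLast_append (xs : List Int) (j : Int) :
    PySem.List.pyGetD (xs ++ [j]) (-1) 0 = j := by
  simp only [PySem.List.pyGetD, PySem.List.pyGet?, PySem.List.pyIdx?]
  have h1 : ¬ (0 : Int) ≤ -1 := by omega
  have h2 : -(((xs ++ [j]).length : Int)) ≤ -1 := by simp only [List.length_append, List.length_cons, List.length_nil]; push_cast; omega
  simp only [h1, if_false, h2, if_true]
  have h3 : (xs ++ [j]).length - (-(-1 : Int)).toNat = xs.length := by simp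
  rw [h3]
  simp

theorem pvGetD_append_left (L t : List String) (i : Int) (h0 : 0 ≤ i) (h1 : i < (L.length : Int)) :
    PySem.List.pyGetD (L ++ t) i "" = PySem.List.pyGetD L i "" := by
  rw [PySem.List.pyGetD_eq_getElem _ _ h0 (by simp; omega),
      PySem.List.pyGetD_eq_getElem _ _ h0 h1]
  rw [List.getElem_append_left]

theorem pvV1 (p : String → Bool) (L : List String) (l : String) (h : p l = true) :
    pvVal p (L ++ [l]) = l := by
  unfold pvVal
  rw [pvM1, h, if_pos rfl, pvLast_append]
  have : ((L ++ [l]).length : Int) = (L.length : Int) + 1 := by simp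
  rw [PySem.List.pyGetD_eq_getElem _ _ (by omega) (by simp)]
  simp

theorem pvV2 (p : String → Bool) (L : List String) (l : String) (h : p l = false)
    (hm : pvMatches p L ≠ []) : pvVal p (L ++ [l]) = pvVal p L := by
  unfold pvVal
  rw [pvM1 p L l, h]
  simp only [Bool.false_eq_true, if_false, List.append_nil]
  have hmem := pvLast_mem _ hm
  have hb := pvM2 p L _ hmem
  exact pvGetD_append_left L [l] _ hb.1 hb.2

theorem pvE1 (k : String) (p : String → Bool) (L : List String) (l : String)
    (hk : pvPred k l = p l) :
    pvEnt k p (L ++ [l]) = (pvEnt k p L).map (pvUpd l) ++ pvNews k p l L := by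
  unfold pvEnt pvNews
  rw [pvM1]
  cases hpl : p l with
  | false =>
      simp only [Bool.false_eq_true, if_false, List.append_nil, Bool.false_and]
      cases hm : pvMatches p L with
      | nil => simp
      | cons m ms =>
          have hval : pvVal p (L ++ [l]) = pvVal p L := pvV2 p L l hpl (by rw [hm]; simp)
          simp [hval, pvUpd, hk, hpl]
  | true =>
      simp only [if_true, Bool.true_and]
      cases hm : pvMatches p L with
      | nil =>
          have hval : pvVal p (L ++ [l]) = l := pvV1 p L l hpl
          simp [hval]
      | cons m ms =>
          have hval : pvVal p (L ++ [l]) = l := pvV1 p L l hpl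
          simp [hval, pvUpd, hk, hpl]

-- elements of pvEnts: index bound and key shape
theorem pvEnt_mem' (k : String) (p : String → Bool) (L : List String)
    (e : Int × String × String) (h : e ∈ pvEnt k p L) :
    e.1 ∈ pvMatches p L ∧ e.2.1 = k := by
  unfold pvEnt at h
  cases hm : pvMatches p L with
  | nil => rw [hm] at h; simp at h
  | cons m ms =>
      rw [hm] at h
      simp only [List.mem_singleton] at h
      subst h
      exact ⟨by simp, rfl⟩

theorem pvK0 (L : List String) (e : Int × String × String) (h : e ∈ pvEnts L) :
    e.1 < (L.length : Int) ∧
      (e.2.1 = "raw_timing_line" ∨ e.2.1 = "raw_size_line" ∨ e.2.1 = "raw_circuit_line") := by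
  unfold pvEnts at h
  rcases List.mem_append.1 h with h' | h'
  · rcases List.mem_append.1 h' with h'' | h''
    · have := pvEnt_mem' _ _ _ _ h''
      exact ⟨(pvM2 _ _ _ this.1).2, Or.inl this.2⟩
    · have := pvEnt_mem' _ _ _ _ h''
      exact ⟨(pvM2 _ _ _ this.1).2, Or.inr (Or.inl this.2)⟩
  · have := pvEnt_mem' _ _ _ _ h'
    exact ⟨(pvM2 _ _ _ this.1).2, Or.inr (Or.inr this.2)⟩

theorem pvK1T (L : List String) :
    ("raw_timing_line" ∈ (pvEnts L).map (fun e => e.2.1)) ↔ pvMatches pvPT L ≠ [] := by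
  unfold pvEnts pvEnt
  cases pvMatches pvPT L <;> cases pvMatches pvPS L <;> cases pvMatches pvPC L <;> simp

theorem pvK1S (L : List String) :
    ("raw_size_line" ∈ (pvEnts L).map (fun e => e.2.1)) ↔ pvMatches pvPS L ≠ [] := by
  unfold pvEnts pvEnt
  cases pvMatches pvPT L <;> cases pvMatches pvPS L <;> cases pvMatches pvPC L <;> simp

theorem pvK1C (L : List String) :
    ("raw_circuit_line" ∈ (pvEnts L).map (fun e => e.2.1)) ↔ pvMatches pvPC L ≠ [] := by
  unfold pvEnts pvEnt
  cases pvMatches pvPT L <;> cases pvMatches pvPS L <;> cases pvMatches pvPC L <;> simp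

-- sorted step: appending one line updates values in place and appends the new keys
theorem pvNews_fst (k : String) (p : String → Bool) (l : String) (L : List String)
    (x : Int × String × String) (hx : x ∈ pvNews k p l L) : x.1 = (L.length : Int) := by
  unfold pvNews at hx
  split at hx
  · simp only [List.mem_singleton] at hx; rw [hx]
  · simp at hx

theorem pvNews_len (k : String) (p : String → Bool) (l : String) (L : List String) :
    (pvNews k p l L).length ≤ 1 := by
  unfold pvNews; split <;> simp

theorem pvL5 (L : List String) (l : String) :
    pvS (L ++ [l]) = (pvS L).map (pvUpd l)
      ++ (pvNews "raw_timing_line" pvPT l L ++ pvNews "raw_size_line" pvPS l L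
          ++ pvNews "raw_circuit_line" pvPC l L) := by
  have hu : ∀ e, (pvUpd l e).1 = e.1 := fun e => rfl
  have hents : pvEnts (L ++ [l])
      = ((pvEnt "raw_timing_line" pvPT L).map (pvUpd l) ++ pvNews "raw_timing_line" pvPT l L)
        ++ (((pvEnt "raw_size_line" pvPS L).map (pvUpd l) ++ pvNews "raw_size_line" pvPS l L)
        ++ (((pvEnt "raw_circuit_line" pvPC L).map (pvUpd l) ++ pvNews "raw_circuit_line" pvPC l L))) := by
    unfold pvEnts
    rw [pvE1 _ _ _ _ (by simp [pvPred]), pvE1 _ _ _ _ (by simp [pvPred]),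
        pvE1 _ _ _ _ (by simp [pvPred])]
    simp [List.append_assoc]
  have hb : ∀ e ∈ pvEnts L, e.1 < (L.length : Int) := fun e he => (pvK0 L e he).1
  have hbT : ∀ e ∈ pvEnt "raw_timing_line" pvPT L, e.1 < (L.length : Int) := by
    intro e he; exact hb e (by unfold pvEnts; simp [he])
  have hbS : ∀ e ∈ pvEnt "raw_size_line" pvPS L, e.1 < (L.length : Int) := by
    intro e he; exact hb e (by unfold pvEnts; simp [he])
  have hbC : ∀ e ∈ pvEnt "raw_circuit_line" pvPC L, e.1 < (L.length : Int) := by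
    intro e he; exact hb e (by unfold pvEnts; simp [he])
  set f : List (Int × String × String) → Int × String × String → List (Int × String × String) :=
    fun acc x => PySem.List.insertBy pvBf x acc with hf
  have hS' : pvS (L ++ [l]) = (pvEnts (L ++ [l])).foldl f [] := by
    unfold pvS; rw [PySem.List.sorted_eq_foldl_insertBy]; rfl
  have hNTf := pvNews_fst "raw_timing_line" pvPT l L
  have hNSf := pvNews_fst "raw_size_line" pvPS l L
  have hNCf := pvNews_fst "raw_circuit_line" pvPC l L
  have hX1 : ∀ y ∈ ((pvEnt "raw_timing_line" pvPT L).foldl f []), y.1 < (L.length : Int) := by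
    intro y hy
    rcases pvG4 _ _ _ hy with h | h
    · simp at h
    · exact hbT y h
  have hX2 : ∀ y ∈ ((pvEnt "raw_size_line" pvPS L).foldl f ((pvEnt "raw_timing_line" pvPT L).foldl f [])), y.1 < (L.length : Int) := by
    intro y hy
    rcases pvG4 _ _ _ hy with h | h
    · exact hX1 y h
    · exact hbS y h
  have hX3 : ∀ y ∈ ((pvEnt "raw_circuit_line" pvPC L).foldl f ((pvEnt "raw_size_line" pvPS L).foldl f ((pvEnt "raw_timing_line" pvPT L).foldl f []))), y.1 < (L.length : Int) := by
    intro y hy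
    rcases pvG4 _ _ _ hy with h | h
    · exact hX2 y h
    · exact hbC y h
  have e1 : ((pvEnt "raw_timing_line" pvPT L).map (pvUpd l)).foldl f [] = ((pvEnt "raw_timing_line" pvPT L).foldl f []).map (pvUpd l) := by
    simpa using pvG1f (pvUpd l) hu (pvEnt "raw_timing_line" pvPT L) []
  have e2 : (pvNews "raw_timing_line" pvPT l L).foldl f (((pvEnt "raw_timing_line" pvPT L).foldl f []).map (pvUpd l)) = ((pvEnt "raw_timing_line" pvPT L).foldl f []).map (pvUpd l) ++ pvNews "raw_timing_line" pvPT l L := by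
    refine pvG2f _ _ (pvNews_len _ _ _ _) ?_
    intro x hx y hy
    rcases List.mem_map.1 hy with ⟨y', hy', rfl⟩
    have h1 := hNTf x hx
    have h2 := hX1 y' hy'
    have h3 := hu y'
    simp only [pvBf, decide_eq_false_iff_not]
    omega
  have e3 : ((pvEnt "raw_size_line" pvPS L).map (pvUpd l)).foldl f (((pvEnt "raw_timing_line" pvPT L).foldl f []).map (pvUpd l) ++ pvNews "raw_timing_line" pvPT l L) = ((pvEnt "raw_size_line" pvPS L).foldl f ((pvEnt "raw_timing_line" pvPT L).foldl f [])).map (pvUpd l) ++ pvNews "raw_timing_line" pvPT l L := by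
    rw [pvG3f]
    · rw [pvG1f (pvUpd l) hu]
    · intro y hy z hz
      rcases List.mem_map.1 hy with ⟨y', hy', rfl⟩
      have h1 := hNTf z hz
      have h2 := hbS y' hy'
      have h3 := hu y'
      simp only [pvBf, decide_eq_true_eq]
      omega
  have e4 : (pvNews "raw_size_line" pvPS l L).foldl f (((pvEnt "raw_size_line" pvPS L).foldl f ((pvEnt "raw_timing_line" pvPT L).foldl f [])).map (pvUpd l) ++ pvNews "raw_timing_line" pvPT l L) = ((pvEnt "raw_size_line" pvPS L).foldl f ((pvEnt "raw_timing_line" pvPT L).foldl f [])).map (pvUpd l) ++ pvNews "raw_timing_line" pvPT l L ++ pvNews "raw_size_line" pvPS l L := by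
    refine pvG2f _ _ (pvNews_len _ _ _ _) ?_
    intro x hx y hy
    have h1 := hNSf x hx
    rcases List.mem_append.1 hy with h | h
    · rcases List.mem_map.1 h with ⟨y', hy', rfl⟩
      have h2 := hX2 y' hy'
      have h3 := hu y'
      simp only [pvBf, decide_eq_false_iff_not]
      omega
    · have h2 := hNTf y h
      simp only [pvBf, decide_eq_false_iff_not]
      omega
  have e5 : ((pvEnt "raw_circuit_line" pvPC L).map (pvUpd l)).foldl f (((pvEnt "raw_size_line" pvPS L).foldl f ((pvEnt "raw_timing_line" pvPT L).foldl f [])).map (pvUpd l) ++ (pvNews "raw_timing_line" pvPT l L ++ pvNews "raw_size_line" pvPS l L)) = ((pvEnt "raw_circuit_line" pvPC L).foldl f ((pvEnt "raw_size_line" pvPS L).foldl f ((pvEnt "raw_timing_line" pvPT L).foldl f []))).map (pvUpd l) ++ (pvNews "raw_timing_line" pvPT l L ++ pvNews "raw_size_line" pvPS l L) := by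
    rw [pvG3f]
    · rw [pvG1f (pvUpd l) hu]
    · intro y hy z hz
      rcases List.mem_map.1 hy with ⟨y', hy', rfl⟩
      have h2 := hbC y' hy'
      have h3 := hu y'
      have h1 : z.1 = (L.length : Int) := by
        rcases List.mem_append.1 hz with h | h
        · exact hNTf z h
        · exact hNSf z h
      simp only [pvBf, decide_eq_true_eq]
      omega
  have e6 : (pvNews "raw_circuit_line" pvPC l L).foldl f (((pvEnt "raw_circuit_line" pvPC L).foldl f ((pvEnt "raw_size_line" pvPS L).foldl f ((pvEnt "raw_timing_line" pvPT L).foldl f []))).map (pvUpd l) ++ (pvNews "raw_timing_line" pvPT l L ++ pvNews "raw_size_line" pvPS l L)) = ((pvEnt "raw_circuit_line" pvPC L).foldl f ((pvEnt "raw_size_line" pvPS L).foldl f ((pvEnt "raw_timing_line" pvPT L).foldl f []))).map (pvUpd l) ++ (pvNews "raw_timing_line" pvPT l L ++ pvNews "raw_size_line" pvPS l L) ++ pvNews "raw_circuit_line" pvPC l L := by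
    refine pvG2f _ _ (pvNews_len _ _ _ _) ?_
    intro x hx y hy
    have h1 := hNCf x hx
    have h2 : y.1 ≤ (L.length : Int) := by
      rcases List.mem_append.1 hy with h | h
      · rcases List.mem_map.1 h with ⟨y', hy', rfl⟩
        have h4 := hX3 y' hy'
        have h5 := hu y'
        omega
      · rcases List.mem_append.1 h with h' | h'
        · exact le_of_eq (hNTf y h')
        · exact le_of_eq (hNSf y h')
    simp only [pvBf, decide_eq_false_iff_not]
    omega
  have hSL : pvS L = ((pvEnt "raw_circuit_line" pvPC L).foldl f ((pvEnt "raw_size_line" pvPS L).foldl f ((pvEnt "raw_timing_line" pvPT L).foldl f []))) := by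
    unfold pvS pvEnts
    rw [PySem.List.sorted_eq_foldl_insertBy]
    simp only [List.foldl_append]
    rfl
  rw [hS', hents]
  simp only [List.foldl_append]
  rw [e1, e2, ← List.append_assoc, e3]
  rw [e4, List.append_assoc (((pvEnt "raw_size_line" pvPS L).foldl f ((pvEnt "raw_timing_line" pvPT L).foldl f [])).map (pvUpd l)) (pvNews "raw_timing_line" pvPT l L) (pvNews "raw_size_line" pvPS l L), e5, e6, hSL]

theorem pvDS (d : PySem.Dict String String) (items0 n : List (String × String))
    (u : String × String → String × String) (k v : String) (b : Bool)
    (hd : d.items = items0.map u ++ n) (hu : ∀ p, (u p).1 = p.1) (hn : ∀ p ∈ n, p.1 ≠ k) :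
    (if b then d.insert k v else d).items
      = items0.map (fun p => if b && (p.1 == k) then (k, v) else u p)
        ++ (if b && !(decide (k ∈ items0.map Prod.fst)) then n ++ [(k, v)] else n) := by
  have hmapfst : (items0.map u).map Prod.fst = items0.map Prod.fst := by
    rw [List.map_map]
    exact List.map_congr_left (fun p _ => hu p)
  have hkeys : d.keys = items0.map Prod.fst ++ n.map Prod.fst := by
    show d.items.map Prod.fst = _
    rw [hd, List.map_append, hmapfst]
  have hcont : d.contains k = decide (k ∈ items0.map Prod.fst) := by
    by_cases hk : k ∈ items0.map Prod.fst
    · simp only [hk, decide_true]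
      exact (PySem.Dict.contains_iff_mem_keys d k).2 (by rw [hkeys]; exact List.mem_append_left _ hk)
    · simp only [hk, decide_false]
      by_contra hc
      have := (PySem.Dict.contains_iff_mem_keys d k).1 (by revert hc; cases d.contains k <;> simp)
      rw [hkeys] at this
      rcases List.mem_append.1 this with h | h
      · exact hk h
      · rcases List.mem_map.1 h with ⟨p, hp, rfl⟩
        exact hn p hp rfl
  cases b with
  | false =>
      simp only [Bool.false_and, Bool.false_eq_true, if_false, hd]

  | true =>
      simp only [if_true, Bool.true_and]
      by_cases hk : k ∈ items0.map Prod.fst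
      · rw [PySem.Dict.items_insert_of_contains d v (by rw [hcont]; simp [hk])]
        rw [hd, List.map_append, List.map_map]
        simp only [hk, decide_true, Bool.not_true, Bool.false_eq_true, if_false]
        congr 1
        · exact List.map_congr_left (fun p _ => by
            simp only [Function.comp_apply, hu p])
        · have : List.map (fun p => if (p.1 == k) = true then (k, v) else p) n = n.map id :=
            List.map_congr_left (fun p hp => by
              simp [beq_eq_false_iff_ne.mpr (hn p hp)])
          rw [this, List.map_id]
      · rw [PySem.Dict.items_insert_of_not_contains d v (by rw [hcont]; simp [hk])]
        rw [hd]
        simp only [hk, decide_false, Bool.not_false, if_true]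
        rw [List.append_assoc]
        congr 1
        exact (List.map_congr_left (fun p hp => by
          have hne : p.1 ≠ k := fun he => hk (by rw [← he]; exact List.mem_map_of_mem hp)
          simp [beq_eq_false_iff_ne.mpr hne])).symm

-- main invariant: A's dict items are the sorted entries
set_option maxHeartbeats 1000000 in
theorem pvMAIN (L : List String) :
    (L.foldl pvStep PySem.Dict.empty).items = (pvS L).map pvStrip2 := by
  induction L using List.reverseRecOn with
  | nil => rfl
  | append_singleton L l IH =>
      rw [List.foldl_append, List.foldl_cons, List.foldl_nil, pvL5]
      have hperm : (pvS L).Perm (pvEnts L) :=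
        PySem.List.sorted_perm (pvEnts L) (fun e => e.1) false
      have hmemS : ∀ e ∈ pvS L, e ∈ pvEnts L := fun e he => hperm.mem_iff.1 he
      set d := L.foldl pvStep PySem.Dict.empty with hdd
      have h1 := pvDS d ((pvS L).map pvStrip2) [] id "raw_timing_line" l (pvPT l)
        (by rw [List.map_id, List.append_nil]; exact IH) (fun p => rfl)
        (by intro p hp; simp at hp)
      have h2 := pvDS _ _ _ _ "raw_size_line" l (pvPS l) h1
        (by
          intro p
          dsimp only [id]
          split
          · next h =>
              simp only [Bool.and_eq_true, beq_iff_eq] at h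
              rw [h.2]
          · rfl)
        (by
          intro p hp
          split at hp
          · simp only [List.nil_append, List.mem_singleton] at hp
            rw [hp]
            simp
          · simp at hp)
      have h3 := pvDS _ _ _ _ "raw_circuit_line" l (pvPC l) h2
        (by
          intro p
          dsimp only [id]
          split
          · next h =>
              simp only [Bool.and_eq_true, beq_iff_eq] at h
              rw [h.2]
          · split
            · next h =>
                simp only [Bool.and_eq_true, beq_iff_eq] at h
                rw [h.2]
            · rfl)
        (by
          intro p hp
          split at hp
          · rcases List.mem_append.1 hp with hp' | hp'
            · split at hp'
              · simp only [List.nil_append, List.mem_singleton] at hp'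
                rw [hp']
                simp
              · simp at hp'
            · simp only [List.mem_singleton] at hp'
              rw [hp']
              simp
          · split at hp
            · simp only [List.nil_append, List.mem_singleton] at hp
              rw [hp]
              simp
            · simp at hp)
      have hgoal : (pvStep d l).items = _ := h3
      rw [hgoal]
      have mT : ("raw_timing_line" ∈ ((pvS L).map pvStrip2).map Prod.fst) ↔ pvMatches pvPT L ≠ [] := by
        rw [List.map_map]
        exact Iff.trans ((hperm.map (fun e => e.2.1)).mem_iff) (pvK1T L)
      have mS : ("raw_size_line" ∈ ((pvS L).map pvStrip2).map Prod.fst) ↔ pvMatches pvPS L ≠ [] := by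
        rw [List.map_map]
        exact Iff.trans ((hperm.map (fun e => e.2.1)).mem_iff) (pvK1S L)
      have mC : ("raw_circuit_line" ∈ ((pvS L).map pvStrip2).map Prod.fst) ↔ pvMatches pvPC L ≠ [] := by
        rw [List.map_map]
        exact Iff.trans ((hperm.map (fun e => e.2.1)).mem_iff) (pvK1C L)
      rw [List.map_append]
      refine congrArg₂ (· ++ ·) ?_ ?_
      · rw [List.map_map, List.map_map]
        refine List.map_congr_left ?_
        intro e he
        have hkey := (pvK0 L e (hmemS e he)).2
        obtain ⟨i, k2, v2⟩ := e
        simp only at hkey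
        rcases hkey with rfl | rfl | rfl <;>
          (cases hT : pvPT l <;> cases hS : pvPS l <;> cases hC : pvPC l <;>
            simp [pvStrip2, pvUpd, pvPred, hT, hS, hC])
      · simp only [List.map_append]
        unfold pvNews
        have bT : decide ("raw_timing_line" ∈ List.map Prod.fst (List.map pvStrip2 (pvS L)))
            = !(pvMatches pvPT L).isEmpty := by
          by_cases hmem : ("raw_timing_line" ∈ List.map Prod.fst (List.map pvStrip2 (pvS L)))
          · rw [decide_eq_true hmem]
            rcases hm : pvMatches pvPT L with _ | ⟨a, as⟩
            · exact absurd hm (mT.1 hmem)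
            · rfl
          · have hnil : pvMatches pvPT L = [] := by
              by_contra hne; exact hmem (mT.2 hne)
            rw [decide_eq_false hmem, hnil]
            rfl
        have bS : decide ("raw_size_line" ∈ List.map Prod.fst (List.map pvStrip2 (pvS L)))
            = !(pvMatches pvPS L).isEmpty := by
          by_cases hmem : ("raw_size_line" ∈ List.map Prod.fst (List.map pvStrip2 (pvS L)))
          · rw [decide_eq_true hmem]
            rcases hm : pvMatches pvPS L with _ | ⟨a, as⟩
            · exact absurd hm (mS.1 hmem)
            · rfl
          · have hnil : pvMatches pvPS L = [] := by
              by_contra hne; exact hmem (mS.2 hne)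
            rw [decide_eq_false hmem, hnil]
            rfl
        have bC : decide ("raw_circuit_line" ∈ List.map Prod.fst (List.map pvStrip2 (pvS L)))
            = !(pvMatches pvPC L).isEmpty := by
          by_cases hmem : ("raw_circuit_line" ∈ List.map Prod.fst (List.map pvStrip2 (pvS L)))
          · rw [decide_eq_true hmem]
            rcases hm : pvMatches pvPC L with _ | ⟨a, as⟩
            · exact absurd hm (mC.1 hmem)
            · rfl
          · have hnil : pvMatches pvPC L = [] := by
              by_contra hne; exact hmem (mC.2 hne)
            rw [decide_eq_false hmem, hnil]
            rfl
        rw [bT, bS, bC]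
        cases hT2 : pvMatches pvPT L <;> cases hS2 : pvMatches pvPS L <;>
          cases hC2 : pvMatches pvPC L <;>
          cases hT1 : pvPT l <;> cases hS1 : pvPS l <;> cases hC1 : pvPC l <;>
          simp [pvStrip2]

theorem pvAmain (stdout : String) :
    parse_timing_output_py stdout
      = ((((PySem.Str.split? stdout "\n").getD []).map PySem.Str.strip).foldl pvStep
          PySem.Dict.empty).items := by
  unfold parse_timing_output_py
  rw [List.foldl_map]
  rfl

-- ---- sorted is the identity on a list already nondecreasing in the key ----
theorem pvSorted_self (xs : List (Int × String × String))
    (h : xs.Pairwise (fun a b => a.1 ≤ b.1)) :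
    PySem.List.sorted xs (fun e => e.1) = xs := by
  induction xs using List.reverseRecOn with
  | nil => rfl
  | append_singleton L x IH =>
      rw [PySem.List.sorted_eq_foldl_insertBy]
      rw [List.foldl_append, List.foldl_cons, List.foldl_nil]
      have hpair := List.pairwise_append.1 h
      have hL : (L.foldl (fun acc y => PySem.List.insertBy pvBf y acc) []) = L := by
        have := IH hpair.1
        rw [PySem.List.sorted_eq_foldl_insertBy] at this
        exact this
      show PySem.List.insertBy pvBf x (L.foldl (fun acc y => PySem.List.insertBy pvBf y acc) []) = L ++ [x]
      rw [hL]
      refine PySem.List.insertBy_of_forall_not_before _ _ _ ?_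
      intro y hy
      have := hpair.2.2 y hy x (by simp)
      simp only [pvBf, decide_eq_false_iff_not]
      omega

-- ---- first match index = findIdx? ----
theorem pvMatches_head_gen (p : String → Bool) (L : List String) (s : Int) :
    (((PySem.List.enumerate L s).filter (fun q => p q.2)).map (fun q => q.1)).head?
      = (L.findIdx? p).map (fun i => s + (i : Int)) := by
  induction L generalizing s with
  | nil => simp [PySem.List.enumerate_nil, List.findIdx?_nil]
  | cons a as ih =>
      rw [PySem.List.enumerate_cons, List.findIdx?_cons]
      cases hp : p a with
      | true => simp [hp]
      | false =>
          simp only [List.filter_cons]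
          simp only [hp, Bool.false_eq_true, if_false]
          rw [ih (s + 1)]
          cases hfi : as.findIdx? p <;> simp
          ring

theorem pvMatches_head (p : String → Bool) (L : List String) :
    (pvMatches p L).head? = (L.findIdx? p).map (fun i => (i : Int)) := by
  unfold pvMatches
  rw [pvMatches_head_gen]
  cases L.findIdx? p <;> simp

theorem pvEnt_fst (k : String) (p : String → Bool) (L : List String)
    (e : Int × String × String) (h : e ∈ pvEnt k p L) :
    ∃ i, L.findIdx? p = some i ∧ e.1 = (i : Int) := by
  unfold pvEnt at h
  cases hm : pvMatches p L with
  | nil => rw [hm] at h; simp at h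
  | cons m ms =>
      rw [hm] at h
      simp only [List.mem_singleton] at h
      subst h
      have := pvMatches_head p L
      rw [hm] at this
      cases hfi : L.findIdx? p with
      | none => rw [hfi] at this; simp at this
      | some i =>
          rw [hfi] at this
          simp at this
          exact ⟨i, rfl, by simp [this]⟩

theorem pvEnt_pairwise (k : String) (p : String → Bool) (L : List String)
    (R : Int × String × String → Int × String × String → Prop) :
    (pvEnt k p L).Pairwise R := by
  unfold pvEnt
  cases pvMatches p L <;> simp

theorem pvEnts_pairwise (L : List String)
    (hTS : pvLeO (L.findIdx? pvPT) (L.findIdx? pvPS) = true)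
    (hSC : pvLeO (L.findIdx? pvPS) (L.findIdx? pvPC) = true)
    (hTC : pvLeO (L.findIdx? pvPT) (L.findIdx? pvPC) = true) :
    (pvEnts L).Pairwise (fun a b => a.1 ≤ b.1) := by
  have cross : ∀ (k1 k2 : String) (p1 p2 : String → Bool),
      pvLeO (L.findIdx? p1) (L.findIdx? p2) = true →
      ∀ x ∈ pvEnt k1 p1 L, ∀ y ∈ pvEnt k2 p2 L, x.1 ≤ y.1 := by
    intro k1 k2 p1 p2 hle x hx y hy
    obtain ⟨i, hi, hxi⟩ := pvEnt_fst _ _ _ _ hx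
    obtain ⟨j, hj, hyj⟩ := pvEnt_fst _ _ _ _ hy
    rw [hi, hj] at hle
    simp only [pvLeO, decide_eq_true_eq] at hle
    rw [hxi, hyj]
    exact_mod_cast hle
  unfold pvEnts
  rw [List.pairwise_append]
  refine ⟨?_, ?_, ?_⟩
  · rw [List.pairwise_append]
    exact ⟨pvEnt_pairwise _ _ _ _, pvEnt_pairwise _ _ _ _,
      cross _ _ _ _ hTS⟩
  · exact pvEnt_pairwise _ _ _ _
  · intro x hx y hy
    rcases List.mem_append.1 hx with h | h
    · exact cross _ _ _ _ hTC x h y hy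
    · exact cross _ _ _ _ hSC x h y hy

-- ---- the stripped entries are the canonical segments ----
theorem pvEnt_strip (k : String) (p : String → Bool) (L : List String) :
    (pvEnt k p L).map pvStrip2 = pvSeg k (L.reverse.find? p) := by
  induction L using List.reverseRecOn with
  | nil => rfl
  | append_singleton L l IH =>
      have hrev : (L ++ [l]).reverse.find? p = if p l then some l else L.reverse.find? p := by
        rw [List.reverse_append]
        simp [List.find?_cons]
        cases hp : p l <;> simp
      rw [hrev]
      unfold pvEnt
      rw [pvM1]
      cases hp : p l with
      | true =>
          have hval : pvVal p (L ++ [l]) = l := pvV1 p L l hp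
          simp only [if_true]
          cases hm : pvMatches p L <;> simp [hval, pvSeg, pvStrip2]
      | false =>
          simp only [Bool.false_eq_true, if_false, List.append_nil]
          cases hm : pvMatches p L with
          | nil =>
              rw [← IH]
              unfold pvEnt
              rw [hm]
          | cons m ms =>
              have hval : pvVal p (L ++ [l]) = pvVal p L := pvV2 p L l hp (by rw [hm]; simp)
              rw [← IH]
              unfold pvEnt
              rw [hm, hval]

theorem pvEnts_strip (L : List String) :
    (pvEnts L).map pvStrip2 = pvCanon L := by
  unfold pvEnts pvCanon
  rw [List.map_append, List.map_append, pvEnt_strip, pvEnt_strip, pvEnt_strip]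

-- A's value under Pre_ is the canonical list
theorem pvAfinal (stdout : String) (hpre : Pre_parse_timing_output_py stdout) :
    parse_timing_output_py stdout = pvCanon (pvLines stdout) := by
  obtain ⟨hTS, hSC, hTC⟩ := hpre
  rw [pvAmain, pvMAIN]
  have hL : (((PySem.Str.split? stdout "\n").getD []).map PySem.Str.strip) = pvLines stdout := rfl
  rw [hL] at *
  have hpair := pvEnts_pairwise (pvLines stdout) hTS hSC hTC
  have hs : pvS (pvLines stdout) = pvEnts (pvLines stdout) := by
    unfold pvS
    exact pvSorted_self _ hpair
  rw [hs, pvEnts_strip]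

-- ---- B-side: one conditional insert of the loop body ----
theorem pvStepGet (f : PySem.Dict String String) (k k' line : String) (b : Bool) :
    (if !(f.contains k) && b then f.insert k line else f).get? k'
      = if k' = k then (f.get? k).or (if b then some line else none) else f.get? k' := by
  by_cases hk : k' = k
  · subst hk
    cases hc : f.contains k' with
    | false =>
        have hnone : f.get? k' = none := by
          have := PySem.Dict.contains_eq_isSome_get? (d := f) (k := k')
          rw [hc] at this
          cases hg : f.get? k' with
          | none => rfl
          | some v => rw [hg] at this; simp at this
        cases b with
        | false => simp [hnone]
        | true => simp [hnone, PySem.Dict.get?_insert_self]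
    | true =>
        have hsome : ∃ v, f.get? k' = some v := by
          have := PySem.Dict.contains_eq_isSome_get? (d := f) (k := k')
          rw [hc] at this
          cases hg : f.get? k' with
          | none => rw [hg] at this; simp at this
          | some v => exact ⟨v, rfl⟩
        obtain ⟨v, hv⟩ := hsome
        simp [hv]
  · cases hcond : (!(f.contains k) && b) with
    | false => simp [hk]
    | true => simp [hk, PySem.Dict.get?_insert_of_ne _ _ hk]

theorem pvStepKeysSub (f : PySem.Dict String String) (k line : String) (b : Bool) (k' : String)
    (h : k' ∈ (if !(f.contains k) && b then f.insert k line else f).keys) :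
    k' = k ∨ k' ∈ f.keys := by
  split at h
  · exact (PySem.Dict.mem_keys_insert _ _ _ _).1 h
  · exact Or.inr h

theorem pvStepNodup (f : PySem.Dict String String) (k line : String) (b : Bool)
    (h : f.keys.Nodup) :
    (if !(f.contains k) && b then f.insert k line else f).keys.Nodup := by
  split
  · next hc =>
      have hcf : f.contains k = false := by
        revert hc
        cases f.contains k <;> simp
      rw [PySem.Dict.keys_insert_of_not_contains _ _ hcf]
      have hnm : k ∉ f.keys := fun hm => by
        rw [(PySem.Dict.contains_iff_mem_keys f k).2 hm] at hcf
        cases hcf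
      rw [List.nodup_append]
      refine ⟨h, by simp, ?_⟩
      intro a ha b hb
      simp only [List.mem_singleton] at hb
      subst hb
      exact fun he => hnm (he ▸ ha)
  · exact h

-- the loop's result, looked up at each of the three keys
set_option maxHeartbeats 1000000 in
theorem pvLoop_get? (R : List String) :
    ∀ (found : PySem.Dict String String), found.keys.Nodup →
      (∀ k ∈ found.keys, k = "raw_timing_line" ∨ k = "raw_size_line" ∨ k = "raw_circuit_line") →
      ((pvAltLoop pvPatterns found R).get? "raw_timing_line"
          = (found.get? "raw_timing_line").or ((R.map PySem.Str.strip).find? pvPT)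
        ∧ (pvAltLoop pvPatterns found R).get? "raw_size_line"
          = (found.get? "raw_size_line").or ((R.map PySem.Str.strip).find? pvPS)
        ∧ (pvAltLoop pvPatterns found R).get? "raw_circuit_line"
          = (found.get? "raw_circuit_line").or ((R.map PySem.Str.strip).find? pvPC)) := by
  induction R with
  | nil =>
      intro found _ _
      simp [pvAltLoop]
  | cons raw rest ih =>
      intro found hnd hsub
      have hloop : pvAltLoop pvPatterns found (raw :: rest)
          = (let line := PySem.Str.strip raw
             let low := PySem.Str.lower line
             let found' := pvPatterns.foldl
               (fun f p =>
                 if !(f.contains p.1) && p.2.any (fun s => PySem.Str.isIn s low) then f.insert p.1 line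
                 else f) found
             if found'.size == pvPatterns.length then found' else pvAltLoop pvPatterns found' rest) := rfl
      rw [hloop]
      simp only [pvPatterns, List.foldl_cons, List.foldl_nil, List.any_cons, List.any_nil,
        Bool.or_false, List.length_cons, List.length_nil]
      set line := PySem.Str.strip raw with hline
      set f1 := if !(found.contains "raw_timing_line")
          && (PySem.Str.isIn "time" (PySem.Str.lower line) || PySem.Str.isIn "seconds" (PySem.Str.lower line))
        then found.insert "raw_timing_line" line else found with hf1
      set f2 := if !(f1.contains "raw_size_line")
          && (PySem.Str.isIn "kb" (PySem.Str.lower line) || PySem.Str.isIn "size" (PySem.Str.lower line))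
        then f1.insert "raw_size_line" line else f1 with hf2
      set f3 := if !(f2.contains "raw_circuit_line")
          && (PySem.Str.isIn "gates" (PySem.Str.lower line) || PySem.Str.isIn "circuit" (PySem.Str.lower line))
        then f2.insert "raw_circuit_line" line else f2 with hf3
      -- lookups after the three conditional inserts
      have gT : f3.get? "raw_timing_line"
          = (found.get? "raw_timing_line").or (if pvPT line then some line else none) := by
        rw [hf3, pvStepGet, if_neg (by decide)]
        rw [hf2, pvStepGet, if_neg (by decide)]
        rw [hf1, pvStepGet, if_pos rfl]
        rfl
      have gS : f3.get? "raw_size_line"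
          = (found.get? "raw_size_line").or (if pvPS line then some line else none) := by
        rw [hf3, pvStepGet, if_neg (by decide)]
        rw [hf2, pvStepGet, if_pos rfl]
        have : f1.get? "raw_size_line" = found.get? "raw_size_line" := by
          rw [hf1, pvStepGet, if_neg (by decide)]
        rw [this]
        rfl
      have gC : f3.get? "raw_circuit_line"
          = (found.get? "raw_circuit_line").or (if pvPC line then some line else none) := by
        rw [hf3, pvStepGet, if_pos rfl]
        have h2 : f2.get? "raw_circuit_line" = found.get? "raw_circuit_line" := by
          rw [hf2, pvStepGet, if_neg (by decide), hf1, pvStepGet, if_neg (by decide)]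
        rw [h2]
        rfl
      have hnd3 : f3.keys.Nodup := by
        rw [hf3]; apply pvStepNodup
        rw [hf2]; apply pvStepNodup
        rw [hf1]; exact pvStepNodup _ _ _ _ hnd
      have hsub3 : ∀ k ∈ f3.keys,
          k = "raw_timing_line" ∨ k = "raw_size_line" ∨ k = "raw_circuit_line" := by
        intro k hk
        rcases pvStepKeysSub _ _ _ _ _ (hf3 ▸ hk) with h | hk2
        · exact Or.inr (Or.inr h)
        · rcases pvStepKeysSub _ _ _ _ _ (hf2 ▸ hk2) with h | hk1
          · exact Or.inr (Or.inl h)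
          · rcases pvStepKeysSub _ _ _ _ _ (hf1 ▸ hk1) with h | hk0
            · exact Or.inl h
            · exact hsub k hk0
      have hfindT : ((raw :: rest).map PySem.Str.strip).find? pvPT
          = if pvPT line then some line else (rest.map PySem.Str.strip).find? pvPT := by
        simp only [List.map_cons, List.find?_cons, ← hline]
        cases pvPT line <;> simp
      have hfindS : ((raw :: rest).map PySem.Str.strip).find? pvPS
          = if pvPS line then some line else (rest.map PySem.Str.strip).find? pvPS := by
        simp only [List.map_cons, List.find?_cons, ← hline]
        cases pvPS line <;> simp
      have hfindC : ((raw :: rest).map PySem.Str.strip).find? pvPC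
          = if pvPC line then some line else (rest.map PySem.Str.strip).find? pvPC := by
        simp only [List.map_cons, List.find?_cons, ← hline]
        cases pvPC line <;> simp
      split
      · -- break: f3 already has all three keys
        next hsz =>
          have hlen : f3.keys.length = 3 := by
            have : f3.size = 3 := by
              simpa using hsz
            simpa [PySem.Dict.size, PySem.Dict.keys] using this
          have hsubl : f3.keys ⊆ ["raw_timing_line", "raw_size_line", "raw_circuit_line"] := by
            intro k hk
            rcases hsub3 k hk with h | h | h <;> simp [h]
          have hperm : f3.keys.Perm ["raw_timing_line", "raw_size_line", "raw_circuit_line"] :=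
            (List.subperm_of_subset hnd3 hsubl).perm_of_length_le (by rw [hlen]; simp)
          have hmem : ∀ k ∈ (["raw_timing_line", "raw_size_line", "raw_circuit_line"] : List String),
              ∃ v, f3.get? k = some v := by
            intro k hk
            have hk3 : k ∈ f3.keys := hperm.mem_iff.2 hk
            have hc := (PySem.Dict.contains_iff_mem_keys f3 k).2 hk3
            have := PySem.Dict.contains_eq_isSome_get? (d := f3) (k := k)
            rw [hc] at this
            cases hg : f3.get? k with
            | none => rw [hg] at this; simp at this
            | some v => exact ⟨v, rfl⟩
          have resolve : ∀ (k : String) (p : String → Bool),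
              f3.get? k = (found.get? k).or (if p line then some line else none) →
              (∃ v, f3.get? k = some v) →
              f3.get? k = (found.get? k).or
                (if p line then some line else (rest.map PySem.Str.strip).find? p) := by
            intro k p hg ⟨v, hv⟩
            cases hf0 : found.get? k with
            | some w => rw [hg, hf0]; simp
            | none =>
                rw [hg, hf0] at hv ⊢
                simp only [Option.none_or] at hv ⊢
                cases hp : p line with
                | true => simp
                | false => rw [hp] at hv; simp at hv
          refine ⟨?_, ?_, ?_⟩
          · rw [hfindT]
            exact resolve _ pvPT gT (hmem _ (by simp))
          · rw [hfindS]
            exact resolve _ pvPS gS (hmem _ (by simp))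
          · rw [hfindC]
            exact resolve _ pvPC gC (hmem _ (by simp))
      · -- continue with the rest of the lines
        obtain ⟨iT, iS, iC⟩ := ih f3 hnd3 hsub3
        have combine : ∀ (k : String) (p : String → Bool),
            f3.get? k = (found.get? k).or (if p line then some line else none) →
            (pvAltLoop pvPatterns f3 rest).get? k
              = (f3.get? k).or ((rest.map PySem.Str.strip).find? p) →
            (pvAltLoop pvPatterns f3 rest).get? k
              = (found.get? k).or (if p line then some line else (rest.map PySem.Str.strip).find? p) := by
          intro k p hg hi
          rw [hi, hg, Option.or_assoc]
          cases hp : p line <;> simp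
        exact ⟨by rw [hfindT]; exact combine _ pvPT gT iT,
               by rw [hfindS]; exact combine _ pvPS gS iS,
               by rw [hfindC]; exact combine _ pvPC gC iC⟩

-- B's value is the canonical list
theorem pvBfinal (stdout : String) :
    parse_timing_output_py_alt stdout = pvCanon (pvLines stdout) := by
  unfold parse_timing_output_py_alt
  obtain ⟨hT, hS, hC⟩ := pvLoop_get? (((PySem.Str.split? stdout "\n").getD []).reverse)
    PySem.Dict.empty (by simp [PySem.Dict.keys_empty]) (by simp [PySem.Dict.keys_empty])
  set found := pvAltLoop pvPatterns PySem.Dict.empty (((PySem.Str.split? stdout "\n").getD []).reverse) with hfound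
  have hrev : ((((PySem.Str.split? stdout "\n").getD []).reverse).map PySem.Str.strip)
      = (pvLines stdout).reverse := by
    unfold pvLines
    rw [List.map_reverse]
  rw [hrev, PySem.Dict.get?_empty, Option.none_or] at hT hS hC
  simp only [pvPatterns, List.foldl_cons, List.foldl_nil]
  have hcT : found.contains "raw_timing_line" = ((pvLines stdout).reverse.find? pvPT).isSome := by
    rw [PySem.Dict.contains_eq_isSome_get?, hT]
  have hcS : found.contains "raw_size_line" = ((pvLines stdout).reverse.find? pvPS).isSome := by
    rw [PySem.Dict.contains_eq_isSome_get?, hS]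
  have hcC : found.contains "raw_circuit_line" = ((pvLines stdout).reverse.find? pvPC).isSome := by
    rw [PySem.Dict.contains_eq_isSome_get?, hC]
  have hgT : found.getD "raw_timing_line" "" = (found.get? "raw_timing_line").getD "" :=
    PySem.Dict.getD_eq_get?_getD _ _ _
  have hgS : found.getD "raw_size_line" "" = (found.get? "raw_size_line").getD "" :=
    PySem.Dict.getD_eq_get?_getD _ _ _
  have hgC : found.getD "raw_circuit_line" "" = (found.get? "raw_circuit_line").getD "" :=
    PySem.Dict.getD_eq_get?_getD _ _ _
  unfold pvCanon
  cases hfT : (pvLines stdout).reverse.find? pvPT <;>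
    cases hfS : (pvLines stdout).reverse.find? pvPS <;>
      cases hfC : (pvLines stdout).reverse.find? pvPC <;>
        (rw [hfT] at hcT hT; rw [hfS] at hcS hS; rw [hfC] at hcC hC) <;>
          simp [hcT, hcS, hcC, hgT, hgS, hgC, hT, hS, hC, pvSeg]

-- ===== VERDICT (by name: the statement is the Claim_ definition above) =====
theorem parse_timing_output_py_spec : Claim_equal_parse_timing_output_py := by
  intro stdout _ hpre
  unfold Spec_parse_timing_output_py
  rw [pvAfinal stdout hpre, pvBfinal]
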